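-- pv_equiv track=rewrite | github.com/saladfingers379/RIS_SIONNA | app/utils/system.py | _preferred_cuda_variant
-- ===== SOURCE A (Python) =====
-- from typing import Any, Dict, Optional, Tuple
--
-- def _preferred_cuda_variant(variants: list[str]) -> Optional[str]:
--     for candidate in [
--         "cuda_ad_mono_polarized",
--         "cuda_ad_spectral_polarized",
--         "cuda_ad_mono",
--         "cuda_ad_spectral",
--         "cuda_ad_rgb",
--     ]:
--         if candidate in variants:
--             return candidate
--     return None
-- ===== SOURCE B (Python) =====
-- def _preferred_cuda_variant(variants):
--     rank = {
--         "cuda_ad_mono_polarized": 0,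
--         "cuda_ad_spectral_polarized": 1,
--         "cuda_ad_mono": 2,
--         "cuda_ad_spectral": 3,
--         "cuda_ad_rgb": 4,
--     }
--     names = [
--         "cuda_ad_mono_polarized",
--         "cuda_ad_spectral_polarized",
--         "cuda_ad_mono",
--         "cuda_ad_spectral",
--         "cuda_ad_rgb",
--     ]
--     best = 5
--     for v in variants:
--         r = rank.get(v, 5)
--         if r < best:
--             best = r
--     return names[best] if best < 5 else None
-- ===== Notes on version B (the rewrite author's own statement) =====
-- stated objective: alternative
-- what changed: Instead of scanning the fixed 5-name priority list and testing membership in `variants` for each, B builds a rank table once and makes a single pass over `variants`, maintaining a running minimum rank, then maps the best rank back to its name.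
import Mathlib
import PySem

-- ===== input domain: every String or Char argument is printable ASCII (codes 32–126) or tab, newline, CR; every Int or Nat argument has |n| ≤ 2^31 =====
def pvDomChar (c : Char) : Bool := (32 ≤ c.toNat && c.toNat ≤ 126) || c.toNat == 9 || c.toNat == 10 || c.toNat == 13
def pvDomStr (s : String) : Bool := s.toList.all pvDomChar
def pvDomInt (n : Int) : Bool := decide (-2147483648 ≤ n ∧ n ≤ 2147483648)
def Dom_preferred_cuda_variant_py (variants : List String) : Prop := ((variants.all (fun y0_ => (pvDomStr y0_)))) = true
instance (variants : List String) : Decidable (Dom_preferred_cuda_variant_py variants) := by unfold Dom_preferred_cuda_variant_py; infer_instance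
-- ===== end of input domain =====

-- B replaces A's scan of the fixed priority list (membership test per candidate) by one pass
-- over `variants` keeping a running minimum rank from a rank table (alternative decomposition).


-- ===== PORT A =====
-- A loops over the literal 5-candidate list and returns the first candidate that is a
-- member of `variants`; the loop over a 5-element literal is unrolled into the if-chain.
def preferred_cuda_variant_py (variants : List String) : Option String :=
  if variants.contains "cuda_ad_mono_polarized" then some "cuda_ad_mono_polarized"
  else if variants.contains "cuda_ad_spectral_polarized" then some "cuda_ad_spectral_polarized"
  else if variants.contains "cuda_ad_mono" then some "cuda_ad_mono"
  else if variants.contains "cuda_ad_spectral" then some "cuda_ad_spectral"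
  else if variants.contains "cuda_ad_rgb" then some "cuda_ad_rgb"
  else none

-- ===== PORT B =====
-- rank.get(v, 5) over the literal 5-entry dict (exact: distinct literal keys, first match)
def pvRank (v : String) : Nat :=
  if v = "cuda_ad_mono_polarized" then 0
  else if v = "cuda_ad_spectral_polarized" then 1
  else if v = "cuda_ad_mono" then 2
  else if v = "cuda_ad_spectral" then 3
  else if v = "cuda_ad_rgb" then 4
  else 5

-- names[best] if best < 5 else None
def pvName : Nat → Option String
  | 0 => some "cuda_ad_mono_polarized"
  | 1 => some "cuda_ad_spectral_polarized"
  | 2 => some "cuda_ad_mono"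
  | 3 => some "cuda_ad_spectral"
  | 4 => some "cuda_ad_rgb"
  | _ => none

def preferred_cuda_variant_py_alt (variants : List String) : Option String :=
  let best := variants.foldl (fun b v => let r := pvRank v; if r < b then r else b) 5
  pvName best

-- ===== PRECONDITION & SPEC =====
def Spec_preferred_cuda_variant_py (variants : List String) (out : Option String) : Prop := out = preferred_cuda_variant_py_alt variants
instance (variants : List String) (out : Option String) : Decidable (Spec_preferred_cuda_variant_py variants out) := by unfold Spec_preferred_cuda_variant_py; infer_instance

-- ===== CLAIM (what is proved, stated in full; the proofs are below) =====
def Claim_equal_preferred_cuda_variant_py : Prop := ∀ (variants : List String), Dom_preferred_cuda_variant_py variants → Spec_preferred_cuda_variant_py variants (preferred_cuda_variant_py variants)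

-- ===== LEMMAS AND PROOFS =====

-- the if-chain value of the minimum rank present in `variants`
def pvChain (variants : List String) : Nat :=
  if variants.contains "cuda_ad_mono_polarized" then 0
  else if variants.contains "cuda_ad_spectral_polarized" then 1
  else if variants.contains "cuda_ad_mono" then 2
  else if variants.contains "cuda_ad_spectral" then 3
  else if variants.contains "cuda_ad_rgb" then 4
  else 5

theorem pvFold_step (b : Nat) (v : String) :
    (if pvRank v < b then pvRank v else b) = min b (pvRank v) := by
  split_ifs <;> omega

theorem pvFold_min (vs : List String) : ∀ a b : Nat,
    vs.foldl (fun b v => if pvRank v < b then pvRank v else b) (min a b)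
      = min a (vs.foldl (fun b v => if pvRank v < b then pvRank v else b) b) := by
  induction vs with
  | nil => intro a b; simp
  | cons v vs ih =>
      intro a b
      simp only [List.foldl_cons]
      rw [pvFold_step, pvFold_step, Nat.min_assoc]
      exact ih a (min b (pvRank v))

set_option maxHeartbeats 1000000 in
theorem pvFold_chain (vs : List String) :
    vs.foldl (fun b v => if pvRank v < b then pvRank v else b) 5 = pvChain vs := by
  induction vs with
  | nil => simp [pvChain]
  | cons v vs ih =>
      simp only [List.foldl_cons]
      rw [pvFold_step]
      have h5 : min 5 (pvRank v) = min (min 5 (pvRank v)) 5 := by omega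
      rw [h5, pvFold_min, ih]
      simp only [pvChain, pvRank, List.contains_cons, Bool.or_eq_true, beq_iff_eq]
      split_ifs <;> first | omega | tauto

-- ===== VERDICT (by name: the statement is the Claim_ definition above) =====
theorem preferred_cuda_variant_py_spec : Claim_equal_preferred_cuda_variant_py := by
  intro variants _
  unfold Spec_preferred_cuda_variant_py preferred_cuda_variant_py preferred_cuda_variant_py_alt
  rw [show (variants.foldl (fun b v => let r := pvRank v; if r < b then r else b) 5) = pvChain variants from pvFold_chain variants]
  unfold pvChain
  split_ifs <;> rfl
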